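-- pv_equiv track=rewrite | github.com/developerashish02/DSA-PYTHON | recursion/subset pattern/removes_a.py | skip_app_not_starts_with_apple
-- ===== SOURCE A (Python) =====
-- def skip_app_not_starts_with_apple(string, index, output):
--     # base case
--     if index == len(string):
--         return output
--
--     # recursion call
--     # if substring contains apple skip the word
--     substring = string[index:]
--     if substring.startswith("app") and not substring.startswith("apple"):
--         return skip_app_not_starts_with_apple(string, index + 3, output)
--
--     # if apple not contains added to the ans
--     else:
--         output += string[index]
--         return skip_app_not_starts_with_apple(string, index + 1, output)
-- ===== SOURCE B (Python) =====
-- def skip_app_not_starts_with_apple(string, index, output):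
--     chars = list(string[index:])
--     kept = []
--     while chars:
--         if chars[:3] == ["a", "p", "p"] and chars[:5] != ["a", "p", "p", "l", "e"]:
--             del chars[:3]
--         else:
--             kept.append(chars[0])
--             del chars[:1]
--     return output + "".join(kept)
-- ===== Notes on version B (the rewrite author's own statement) =====
-- stated objective: alternative
-- what changed: Replaces the index-tracking tail recursion that re-slices the string and tests startswith at every step by one upfront slice and an iterative while-loop consumption of the character list with an explicit kept-accumulator.
-- outside the precondition, e.g. on skip_app_not_starts_with_apple('ab', -1, ''): A returns 'bab', B returns 'b'; on skip_app_not_starts_with_apple('appx', -5, ''): A returns 'pxx', B returns 'x'; on skip_app_not_starts_with_apple('ab', 5, 'xy'): A raises IndexError, B returns 'xy'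
import Mathlib
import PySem

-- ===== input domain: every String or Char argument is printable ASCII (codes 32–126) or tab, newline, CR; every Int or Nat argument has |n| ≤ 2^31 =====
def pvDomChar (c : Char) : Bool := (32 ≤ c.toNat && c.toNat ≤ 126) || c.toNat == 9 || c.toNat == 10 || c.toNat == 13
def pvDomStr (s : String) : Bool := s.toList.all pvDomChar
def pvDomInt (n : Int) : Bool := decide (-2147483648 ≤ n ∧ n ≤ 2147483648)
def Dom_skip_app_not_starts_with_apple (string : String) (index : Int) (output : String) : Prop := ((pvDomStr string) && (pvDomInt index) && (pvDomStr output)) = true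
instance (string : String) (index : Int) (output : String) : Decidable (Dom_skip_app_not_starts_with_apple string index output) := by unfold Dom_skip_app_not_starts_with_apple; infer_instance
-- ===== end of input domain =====

-- B replaces the index-tracking tail recursion (which re-slices the string at every step) by one
-- upfront slice and an iterative consumption of the character list with an explicit kept-accumulator
-- (objective: alternative decomposition; equivalence is about the return value).

-- ===== PORT A =====
-- termination helpers for port A (cited in decreasing_by)
theorem pvA_dec1 {string : String} {index : Int}
    (h : PySem.Str.startswith (PySem.Str.slice string (some index)) "app" = true) :
    index < PySem.Str.len string := by
  have h' : ("app".toList) <+: (PySem.Str.slice string (some index)).toList := by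
    rw [PySem.Str.startswith_eq] at h
    simp only [PySem.Chars.startswith] at h
    exact List.isPrefixOf_iff_prefix.mp h
  have hlen := h'.length_le
  rw [PySem.Str.toList_slice, PySem.Chars.slice_eq_listSlice, PySem.List.slice_some_none] at hlen
  simp only [List.length_drop] at hlen
  have happ : ("app".toList).length = 3 := by decide
  rw [happ] at hlen
  rw [PySem.Str.len_eq]
  unfold PySem.List.clampIdx at hlen
  split_ifs at hlen <;> omega

theorem pvA_dec2 {string : String} {index : Int} {c : Char}
    (hg : PySem.Str.pyGet? string index = some c) :
    index < PySem.Str.len string := by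
  rw [PySem.Str.pyGet?_eq, PySem.Chars.pyGet?_eq_listPyGet?] at hg
  have hin : PySem.Raise.InRange string.toList.length index := by
    by_contra hc
    rw [(PySem.List.pyGet?_eq_none_iff _ _).mpr hc] at hg
    cases hg
  obtain ⟨-, h2⟩ := hin
  rw [PySem.Str.len_eq]
  exact h2

def skip_app_not_starts_with_apple (string : String) (index : Int) (output : String) : String :=
  if index = PySem.Str.len string then
    output
  else
    let substring := PySem.Str.slice string (some index)
    if h : (PySem.Str.startswith substring "app" && !PySem.Str.startswith substring "apple") = true then
      skip_app_not_starts_with_apple string (index + 3) output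
    else
      match hg : PySem.Str.pyGet? string index with
      | some c => skip_app_not_starts_with_apple string (index + 1) (output.push c)
      | none => output   -- string[index] raises IndexError in Python; excluded by Pre_
termination_by (PySem.Str.len string - index).toNat
decreasing_by
  · have h1 := pvA_dec1 (Bool.and_eq_true_iff.mp h).1
    omega
  · have h1 := pvA_dec2 hg
    omega

-- ===== PORT B =====
-- the while loop of Source B: each iteration consumes at least one char, so chars.length is enough fuel
def pvFilterGo (fuel : Nat) (chars kept : List Char) : List Char :=
  match fuel, chars with
  | 0, _ => kept
  | _ + 1, [] => kept
  | fuel + 1, c :: rest =>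
      if (c :: rest).take 3 = ['a', 'p', 'p'] ∧ (c :: rest).take 5 ≠ ['a', 'p', 'p', 'l', 'e'] then
        pvFilterGo fuel ((c :: rest).drop 3) kept
      else
        pvFilterGo fuel rest (kept ++ [c])

def skip_app_not_starts_with_apple_alt (string : String) (index : Int) (output : String) : String :=
  let chars := (PySem.Str.slice string (some index)).toList
  String.ofList (output.toList ++ pvFilterGo chars.length chars [])

-- ===== PRECONDITION & SPEC =====
-- Pre_ restricts index to the recursion cursor's natural domain 0 ≤ index ≤ len(string): above it A
-- raises IndexError; a negative index is outside the cursor's intended use, and there Python's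
-- negative-index/slice wraparound gives A and B each an accidental value (A filters the suffix and
-- then reprocesses the whole string from 0; B filters only the suffix) — an unspecified corner.
def Pre_skip_app_not_starts_with_apple (string : String) (index : Int) (output : String) : Prop :=
  0 ≤ index ∧ index ≤ PySem.Str.len string
instance (string : String) (index : Int) (output : String) : Decidable (Pre_skip_app_not_starts_with_apple string index output) := by unfold Pre_skip_app_not_starts_with_apple; infer_instance

def pvWitness_skip_app_not_starts_with_apple : String × Int × String := ("apple", 0, "")

def Spec_skip_app_not_starts_with_apple (string : String) (index : Int) (output : String) (out : String) : Prop := out = skip_app_not_starts_with_apple_alt string index output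
instance (string : String) (index : Int) (output : String) (out : String) : Decidable (Spec_skip_app_not_starts_with_apple string index output out) := by unfold Spec_skip_app_not_starts_with_apple; infer_instance

-- ===== CLAIM (what is proved, stated in full; the proofs are below) =====
def Claim_equal_skip_app_not_starts_with_apple : Prop := ∀ (string : String) (index : Int) (output : String), Dom_skip_app_not_starts_with_apple string index output → Pre_skip_app_not_starts_with_apple string index output → Spec_skip_app_not_starts_with_apple string index output (skip_app_not_starts_with_apple string index output)

-- ===== LEMMAS AND PROOFS =====

-- pvFilterGo with enough fuel: fuel-irrelevance and the accumulator invariant in one statement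
theorem pvFilterGo_spec (n : Nat) : ∀ (fuel : Nat) (chars kept : List Char),
    chars.length ≤ fuel → fuel ≤ n →
    pvFilterGo fuel chars kept = kept ++ pvFilterGo chars.length chars [] := by
  induction n with
  | zero =>
      intro fuel chars kept hlen hn
      have : fuel = 0 := by omega
      subst this
      have : chars = [] := by simpa using List.length_eq_zero_iff.mp (by omega)
      subst this
      simp [pvFilterGo]
  | succ n ih =>
      intro fuel chars kept hlen hn
      match fuel, chars with
      | 0, chars =>
          have : chars = [] := by simpa using List.length_eq_zero_iff.mp (by omega)
          subst this
          simp [pvFilterGo]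
      | f + 1, [] => simp [pvFilterGo]
      | f + 1, c :: rest =>
          rw [pvFilterGo]
          by_cases hc : (c :: rest).take 3 = ['a', 'p', 'p'] ∧ (c :: rest).take 5 ≠ ['a', 'p', 'p', 'l', 'e']
          · rw [if_pos hc]
            have hr : (c :: rest).length = rest.length + 1 := by simp
            rw [hr, pvFilterGo, if_pos hc]
            have hd : ((c :: rest).drop 3).length ≤ rest.length := by
              simp only [List.length_drop, List.length_cons]; omega
            rw [ih f _ kept (by simp only [List.length_drop, List.length_cons] at hlen ⊢; omega) (by omega),
                ih rest.length _ [] hd (by simp only [List.length_cons] at hlen; omega)]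
            simp
          · rw [if_neg hc]
            have hr : (c :: rest).length = rest.length + 1 := by simp
            rw [hr, pvFilterGo, if_neg hc]
            rw [ih f rest (kept ++ [c]) (by simp only [List.length_cons] at hlen; omega) (by omega)]
            simp only [List.nil_append]
            rw [ih rest.length rest [c] (by omega) (by simp only [List.length_cons] at hlen; omega)]
            simp

-- translate A's startswith test on the slice into B's take test on the char list
theorem pvCond_iff (string : String) (index : Int) (t : List Char)
    (ht : (PySem.Str.slice string (some index)).toList = t) :
    ((PySem.Str.startswith (PySem.Str.slice string (some index)) "app"
        && !PySem.Str.startswith (PySem.Str.slice string (some index)) "apple") = true)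
      ↔ (t.take 3 = ['a', 'p', 'p'] ∧ t.take 5 ≠ ['a', 'p', 'p', 'l', 'e']) := by
  have happ : "app".toList = ['a', 'p', 'p'] := by decide
  have happle : "apple".toList = ['a', 'p', 'p', 'l', 'e'] := by decide
  rw [Bool.and_eq_true_iff, Bool.not_eq_true', ← Bool.not_eq_true]
  simp only [PySem.Str.startswith_eq, PySem.Chars.startswith, ht, happ, happle,
    List.isPrefixOf_iff_prefix, List.prefix_iff_eq_take]
  constructor
  · rintro ⟨h1, h2⟩
    exact ⟨by simpa using h1.symm, fun hq => h2 (by simpa using hq.symm)⟩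
  · rintro ⟨h1, h2⟩
    exact ⟨by simpa using h1.symm, fun hq => h2 (by simpa using hq.symm)⟩

theorem pvMain (string : String) (n : Nat) : ∀ (index : Int) (output : String),
    0 ≤ index → index ≤ PySem.Str.len string → (PySem.Str.len string - index).toNat ≤ n →
    skip_app_not_starts_with_apple string index output
      = String.ofList (output.toList
          ++ pvFilterGo (string.toList.drop index.toNat).length (string.toList.drop index.toNat) []) := by
  have hlen := PySem.Str.len_eq string
  induction n with
  | zero =>
      intro index output h0 hle hm
      have heq : index = PySem.Str.len string := by omega
      rw [skip_app_not_starts_with_apple, if_pos heq]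
      have hdrop : string.toList.drop index.toNat = [] := by
        rw [List.drop_eq_nil_iff]; omega
      rw [hdrop]
      simp [pvFilterGo, String.ofList_toList]
  | succ n ih =>
      intro index output h0 hle hm
      by_cases heq : index = PySem.Str.len string
      · rw [skip_app_not_starts_with_apple, if_pos heq]
        have hdrop : string.toList.drop index.toNat = [] := by
          rw [List.drop_eq_nil_iff]; omega
        rw [hdrop]
        simp [pvFilterGo, String.ofList_toList]
      · have hlt : index < PySem.Str.len string := lt_of_le_of_ne hle heq
        have ht : (PySem.Str.slice string (some index)).toList = string.toList.drop index.toNat := by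
          rw [PySem.Str.toList_slice, PySem.Chars.slice_eq_listSlice, PySem.List.slice_from _ h0]
        have hlenidx : (string.toList.drop index.toNat).length = string.toList.length - index.toNat := by
          simp
        rw [skip_app_not_starts_with_apple, if_neg heq]
        by_cases hc : (PySem.Str.startswith (PySem.Str.slice string (some index)) "app"
            && !PySem.Str.startswith (PySem.Str.slice string (some index)) "apple") = true
        · rw [dif_pos hc]
          have hcand := (pvCond_iff string index _ ht).mp hc
          have hpre : ['a', 'p', 'p'] <+: string.toList.drop index.toNat := by
            rw [List.prefix_iff_eq_take]
            simpa using hcand.1.symm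
          obtain ⟨u, hu⟩ := hpre
          have hlen3 : 3 ≤ (string.toList.drop index.toNat).length := by
            rw [← hu]; simp
          have hle3 : index + 3 ≤ PySem.Str.len string := by omega
          rw [ih (index + 3) output (by omega) hle3 (by omega)]
          have hdd : string.toList.drop (index + 3).toNat = (string.toList.drop index.toNat).drop 3 := by
            rw [List.drop_drop]; congr 1; omega
          rw [hdd]
          have ht3 : (string.toList.drop index.toNat).drop 3 = u := by rw [← hu]; rfl
          have hcd : ('a' :: 'p' :: 'p' :: u).take 3 = ['a', 'p', 'p'] ∧
              ('a' :: 'p' :: 'p' :: u).take 5 ≠ ['a', 'p', 'p', 'l', 'e'] := by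
            have := hcand
            rw [← hu] at this
            simpa using this
          have hstep : pvFilterGo (u.length + 1 + 1 + 1) ('a' :: 'p' :: 'p' :: u) []
              = pvFilterGo u.length u [] := by
            rw [pvFilterGo, if_pos hcd]
            simp only [List.drop_succ_cons, List.drop_zero]
            rw [pvFilterGo_spec (u.length + 1 + 1) _ u [] (by omega) le_rfl]
            simp
          conv_rhs => rw [← hu]
          simp only [List.cons_append, List.nil_append, List.length_cons]
          rw [hstep, ht3]
        · rw [dif_neg hc]
          have hidx : index.toNat < string.toList.length := by omega
          have hg : PySem.Str.pyGet? string index = some (string.toList[index.toNat]'hidx) := by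
            rw [PySem.Str.pyGet?_eq, PySem.Chars.pyGet?_eq_listPyGet?, PySem.List.pyGet?_of_nonneg _ h0]
            simp
          split
          · rename_i c hgx
            rw [hg] at hgx
            injection hgx with hcc
            subst hcc
            rw [ih (index + 1) _ (by omega) (by omega) (by omega)]
            have hdd : string.toList.drop (index + 1).toNat
                = (string.toList.drop index.toNat).drop 1 := by
              rw [List.drop_drop]; congr 1; omega
            have htc : string.toList[index.toNat] :: (string.toList.drop index.toNat).drop 1
                = string.toList.drop index.toNat := by
              rw [List.drop_drop, List.getElem_cons_drop]
            have hncond := (not_iff_not.mpr (pvCond_iff string index _ ht)).mp hc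
            have hstep : pvFilterGo (((string.toList.drop index.toNat).drop 1).length + 1)
                  (string.toList[index.toNat] :: (string.toList.drop index.toNat).drop 1) []
                = [string.toList[index.toNat]]
                    ++ pvFilterGo ((string.toList.drop index.toNat).drop 1).length
                        ((string.toList.drop index.toNat).drop 1) [] := by
              rw [pvFilterGo, if_neg (by rw [htc]; exact hncond)]
              rw [pvFilterGo_spec ((string.toList.drop index.toNat).drop 1).length _ _
                    ([] ++ [string.toList[index.toNat]]) le_rfl le_rfl]
              simp
            rw [hdd, String.toList_push]
            conv_rhs => rw [← htc]
            simp only [List.length_cons]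
            rw [hstep]
            simp
          · rename_i hgx
            rw [hg] at hgx
            cases hgx

-- ===== VERDICT (by name: the statement is the Claim_ definition above) =====
theorem skip_app_not_starts_with_apple_spec : Claim_equal_skip_app_not_starts_with_apple := by
  intro string index output _ hpre
  unfold Spec_skip_app_not_starts_with_apple skip_app_not_starts_with_apple_alt
  have h := pvMain string (PySem.Str.len string - index).toNat index output hpre.1 hpre.2 le_rfl
  rw [h]
  have ht : (PySem.Str.slice string (some index)).toList = string.toList.drop index.toNat := by
    rw [PySem.Str.toList_slice, PySem.Chars.slice_eq_listSlice, PySem.List.slice_from _ hpre.1]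
  rw [ht]
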